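-- pv_equiv track=rewrite | github.com/addavriance/PZ2 | PZ_2/pz-7-1.py | count_spaces_after_words
-- ===== SOURCE A (Python) =====
-- def count_spaces_after_words(input_string):
--     space_counts = []
--     current_space_count = 0
--
--     for i in range(len(input_string)):
--         char = input_string[i]
--         if char == ' ':
--             current_space_count += 1
--         else:
--             space_counts.append(current_space_count) if current_space_count != 0 else ...
--             current_space_count = 0
--
--     if len(space_counts) < len(input_string.split()):
--         space_counts.insert(0, 0)
--
--     return space_counts
-- ===== SOURCE B (Python) =====
-- def count_spaces_after_words(input_string):
--     # Collect lengths of maximal runs of ' ' (a trailing run of the string never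
--     # counts, so work on the space-rstripped string), then the same final guard.
--     t = input_string.rstrip(' ')
--     result = []
--     i, n = 0, len(t)
--     while i < n:
--         if t[i] == ' ':
--             j = i
--             while j < n and t[j] == ' ':
--                 j += 1
--             result.append(j - i)
--             i = j
--         else:
--             i += 1
--     if len(result) < len(input_string.split()):
--         result.insert(0, 0)
--     return result
-- ===== Notes on version B (the rewrite author's own statement) =====
-- stated objective: alternative
-- what changed: B extracts the maximal space-runs of the space-rstripped string directly (outer loop over runs with an inner run scan) instead of A's per-character counter with reset-and-append; the final split() guard is kept.
import Mathlib
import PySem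

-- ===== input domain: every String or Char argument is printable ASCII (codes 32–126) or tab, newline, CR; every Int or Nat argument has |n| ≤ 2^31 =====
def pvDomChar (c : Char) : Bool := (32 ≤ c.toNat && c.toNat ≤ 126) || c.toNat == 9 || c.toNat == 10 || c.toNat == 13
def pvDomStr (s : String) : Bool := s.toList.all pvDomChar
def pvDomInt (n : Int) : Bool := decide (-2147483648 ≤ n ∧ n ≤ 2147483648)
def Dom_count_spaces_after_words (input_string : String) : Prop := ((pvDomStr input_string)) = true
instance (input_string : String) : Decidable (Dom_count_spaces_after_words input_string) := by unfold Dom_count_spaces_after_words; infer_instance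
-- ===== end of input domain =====

-- B replaces A's per-character counter with a scan over maximal space-runs of the
-- space-rstripped string (alternative decomposition, same cost).

-- ===== PORT A =====
-- A's for-loop reads input_string[i] for i in range(len(...)) left to right: a foldl
-- over the characters with state (space_counts, current_space_count).
def count_spaces_after_words (input_string : String) : List Int :=
  let st := input_string.toList.foldl
    (fun (st : List Int × Int) char =>
      if char = ' ' then (st.1, st.2 + 1)
      else (if st.2 ≠ 0 then st.1 ++ [st.2] else st.1, 0))
    ([], 0)
  let space_counts := st.1
  if space_counts.length < (PySem.Str.split₀ input_string).length then
    0 :: space_counts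
  else space_counts

-- ===== PORT B =====
-- B's outer while over t: skip a non-space char, or swallow a whole run of spaces
-- (the inner while = takeWhile/dropWhile) and record its length.
def pvAltRuns : List Char → List Int
  | [] => []
  | c :: cs =>
    if c = ' ' then
      ((cs.takeWhile (· == ' ')).length + 1 : Int) :: pvAltRuns (cs.dropWhile (· == ' '))
    else pvAltRuns cs
termination_by l => l.length
decreasing_by
  · exact Nat.lt_succ_of_le (List.length_dropWhile_le _ cs)
  · exact Nat.lt_succ_self _

def count_spaces_after_words_alt (input_string : String) : List Int :=
  -- t = input_string.rstrip(' '): drop trailing ' ' only (exact hand port)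
  let t := (input_string.toList.reverse.dropWhile (· == ' ')).reverse
  let result := pvAltRuns t
  if result.length < (PySem.Str.split₀ input_string).length then
    0 :: result
  else result

-- ===== PRECONDITION & SPEC =====
def Spec_count_spaces_after_words (input_string : String) (out : List Int) : Prop := out = count_spaces_after_words_alt input_string
instance (input_string : String) (out : List Int) : Decidable (Spec_count_spaces_after_words input_string out) := by unfold Spec_count_spaces_after_words; infer_instance

-- ===== CLAIM (what is proved, stated in full; the proofs are below) =====
def Claim_equal_count_spaces_after_words : Prop := ∀ (input_string : String), Dom_count_spaces_after_words input_string → Spec_count_spaces_after_words input_string (count_spaces_after_words input_string)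

-- ===== LEMMAS AND PROOFS =====

-- reference function: the non-trailing space-run lengths of l, with cur pending spaces
def pvG : List Char → Int → List Int
  | [], _ => []
  | c :: cs, cur =>
    if c = ' ' then pvG cs (cur + 1)
    else (if cur ≠ 0 then [cur] else []) ++ pvG cs 0

theorem pvFold_eq (l : List Char) : ∀ (acc : List Int) (cur : Int),
    (l.foldl (fun (st : List Int × Int) char =>
      if char = ' ' then (st.1, st.2 + 1)
      else (if st.2 ≠ 0 then st.1 ++ [st.2] else st.1, 0)) (acc, cur)).1
    = acc ++ pvG l cur := by
  induction l with
  | nil => simp [pvG]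
  | cons c cs ih =>
    intro acc cur
    simp only [List.foldl_cons]
    split_ifs with hc h0
    · rw [ih]; simp [pvG, hc]
    · rw [ih]; simp [pvG, hc, h0]
    · rw [ih]; simp [pvG, hc, h0]

theorem pvDropWhile_append_of_neg {p : Char → Bool} {b : Char} (hb : p b = false) :
    ∀ (as bs : List Char), List.dropWhile p (as ++ b :: bs) = List.dropWhile p as ++ b :: bs := by
  intro as bs
  induction as with
  | nil => simp [List.dropWhile, hb]
  | cons a as ih =>
    by_cases ha : p a <;> simp [List.dropWhile, ha, ih]

theorem pvTakeWhile_rep {c : Char} (hc : (c == ' ') = false) (rest : List Char) :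
    ∀ k : Nat, List.takeWhile (· == ' ') (List.replicate k ' ' ++ c :: rest) = List.replicate k ' '
      ∧ List.dropWhile (· == ' ') (List.replicate k ' ' ++ c :: rest) = c :: rest := by
  intro k
  induction k with
  | zero => simp [hc]
  | succ k ih => simpa [List.replicate_succ, List.takeWhile, List.dropWhile] using ih

-- rstrip' below means (·.reverse.dropWhile (· == ' ')).reverse
theorem pvMain (l : List Char) : ∀ cur : Nat,
    pvAltRuns (((List.replicate cur ' ' ++ l).reverse.dropWhile (· == ' ')).reverse)
      = pvG l (cur : Int) := by
  induction l with
  | nil =>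
    intro cur
    simp [pvG, List.reverse_replicate, pvAltRuns]
  | cons c cs ih =>
    intro cur
    by_cases hc : c = ' '
    · subst hc
      have : List.replicate cur ' ' ++ ' ' :: cs = List.replicate (cur + 1) ' ' ++ cs := by
        simp [List.replicate_succ' (n := cur)]
      rw [this]
      have := ih (cur + 1)
      push_cast at this ⊢
      simpa [pvG] using this
    · have hcb : (c == ' ') = false := by simpa using hc
      have hstrip : ((List.replicate cur ' ' ++ c :: cs).reverse.dropWhile (· == ' ')).reverse
          = List.replicate cur ' ' ++ c :: (cs.reverse.dropWhile (· == ' ')).reverse := by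
        have h1 : (List.replicate cur ' ' ++ c :: cs).reverse
            = cs.reverse ++ c :: (List.replicate cur ' ').reverse := by simp
        rw [h1, pvDropWhile_append_of_neg (p := fun x => x == ' ') (b := c) hcb]
        simp
      rw [hstrip]
      have ih0 : pvAltRuns ((cs.reverse.dropWhile (· == ' ')).reverse) = pvG cs 0 := by
        simpa using ih 0
      cases cur with
      | zero => simp [pvAltRuns, pvG, hc, ih0]
      | succ k =>
        have htd := pvTakeWhile_rep hcb ((cs.reverse.dropWhile (· == ' ')).reverse) k
        have hne : ((k : Int) + 1) ≠ 0 := by omega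
        rw [List.replicate_succ, List.cons_append]
        simp [pvAltRuns, htd.1, htd.2, hc, pvG, ih0, hne]

-- ===== VERDICT (by name: the statement is the Claim_ definition above) =====
theorem count_spaces_after_words_spec : Claim_equal_count_spaces_after_words := by
  intro s _
  unfold Spec_count_spaces_after_words count_spaces_after_words count_spaces_after_words_alt
  have hfold := pvFold_eq s.toList [] 0
  have hmain := pvMain s.toList 0
  simp at hmain
  simp only [hfold, List.nil_append, hmain]
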